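-- pv_equiv track=rewrite | github.com/rrwt/daily-coding-challenge | daily_problems/problem_0_to_100/problem_70.py | get_sum_of_digs
-- ===== SOURCE A (Python) =====
-- def get_sum_of_digs(x: int) -> int:
--     s: int = 0
--
--     while True:
--         while x:
--             s += x % 10
--             x = x // 10
--
--         if s <= 10:
--             return s
--         else:
--             x = s
--             s = 0
-- ===== SOURCE B (Python) =====
-- def get_sum_of_digs(x: int) -> int:
--     digits = []
--     while x:
--         x, d = divmod(x, 10)
--         digits.append(d)
--     s = sum(digits)
--     return s if s <= 10 else get_sum_of_digs(s)
-- ===== Notes on version B (the rewrite author's own statement) =====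
-- stated objective: alternative
-- what changed: A's single while-True loop with a shared mutable accumulator is replaced by a staged decomposition: extract the digits into a list with divmod, sum the list, and recurse on the sum instead of iterating.
import Mathlib
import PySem

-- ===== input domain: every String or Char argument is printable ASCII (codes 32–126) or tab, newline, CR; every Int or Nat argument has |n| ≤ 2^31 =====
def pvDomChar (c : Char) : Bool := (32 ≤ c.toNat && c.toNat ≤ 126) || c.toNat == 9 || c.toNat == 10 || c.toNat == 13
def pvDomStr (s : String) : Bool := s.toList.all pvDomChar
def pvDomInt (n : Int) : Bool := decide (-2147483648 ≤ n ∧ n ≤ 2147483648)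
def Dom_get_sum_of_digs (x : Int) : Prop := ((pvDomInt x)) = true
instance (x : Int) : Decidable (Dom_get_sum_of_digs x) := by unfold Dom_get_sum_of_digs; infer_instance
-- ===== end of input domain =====

-- B replaces A's while-True loop with a mutable accumulator by staged passes: build the digit
-- list with divmod, sum it, recurse on the sum (objective: alternative decomposition, same cost).

-- ===== PORT A =====
-- inner `while x: s += x % 10; x = x // 10` carrying the pair (x, s);
-- the x < 0 branch is a totalization guard only (there Python loops forever)
def pvInnerA (x s : Int) : Int × Int :=
  if x = 0 then (x, s)
  else if x < 0 then (x, s)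
  else pvInnerA (PySem.Int.floordiv x 10) (s + PySem.Int.mod x 10)
termination_by x.toNat
decreasing_by
  rename_i h0 hneg
  rw [PySem.Int.floordiv_eq_ediv_of_pos (by omega : (0:Int) < 10)]
  omega

-- outer `while True` loop on state (x, s); fuel is a totalization guard only
-- (for x ≥ 0 the loop exits long before x.toNat + 1 rounds; for x < 0 Python diverges)
def pvOuterA (fuel : Nat) (x s : Int) : Int :=
  match fuel with
  | 0 => x
  | f + 1 =>
    let p := pvInnerA x s
    if p.2 ≤ 10 then p.2 else pvOuterA f p.2 0

def get_sum_of_digs (x : Int) : Int := pvOuterA (x.toNat + 1) x 0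

-- needed by pvDigitsB's termination proof: divmod by the literal divisor 10 never fails
theorem pvDivmodTen (x : Int) : PySem.Int.divmod? x 10 = some (PySem.Int.floordiv x 10, PySem.Int.mod x 10) := by
  simp [PySem.Int.divmod?, PySem.Int.floordiv, PySem.Int.mod]

-- ===== PORT B =====
-- Source B's `while x: x, d = divmod(x, 10); digits.append(d)` building the digit list;
-- the x < 0 branch is the same totalization guard (there Python loops forever)
def pvDigitsB (x : Int) (digits : List Int) : List Int :=
  if x = 0 then digits
  else if x < 0 then digits
  else
    match h : PySem.Int.divmod? x 10 with
    | none => digits      -- unreachable: divisor 10 ≠ 0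
    | some (q, d) => pvDigitsB q (digits ++ [d])
termination_by x.toNat
decreasing_by
  rw [pvDivmodTen] at h
  simp only [Option.some.injEq, Prod.mk.injEq] at h
  rw [← h.1, PySem.Int.floordiv_eq_ediv_of_pos (by omega : (0:Int) < 10)]
  omega

-- `s = sum(digits); return s if s <= 10 else get_sum_of_digs(s)`; fuel is a
-- totalization guard only, never reached when Python terminates
def pvReduceB (fuel : Nat) (x : Int) : Int :=
  match fuel with
  | 0 => x
  | f + 1 =>
    let s := (pvDigitsB x []).foldl (· + ·) 0
    if s ≤ 10 then s else pvReduceB f s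

def get_sum_of_digs_alt (x : Int) : Int := pvReduceB (x.toNat + 1) x

-- ===== PRECONDITION & SPEC =====
-- No Pre_: the ports agree on every input. (On x < 0 both Pythons diverge identically in the
-- inner digit-extraction loop; both ports take the same totalization guard there.)
def Spec_get_sum_of_digs (x : Int) (out : Int) : Prop := out = get_sum_of_digs_alt x
instance (x : Int) (out : Int) : Decidable (Spec_get_sum_of_digs x out) := by unfold Spec_get_sum_of_digs; infer_instance

-- ===== CLAIM (what is proved, stated in full; the proofs are below) =====
def Claim_equal_get_sum_of_digs : Prop := ∀ (x : Int), Dom_get_sum_of_digs x → Spec_get_sum_of_digs x (get_sum_of_digs x)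

-- ===== LEMMAS AND PROOFS =====

-- summing B's digit list equals running A's accumulating inner loop
theorem digitsB_sum (x : Int) (digits : List Int) (c : Int) :
    (pvDigitsB x digits).foldl (· + ·) c = (pvInnerA x (digits.foldl (· + ·) c)).2 := by
  fun_induction pvDigitsB x digits with
  | case1 digits => rw [pvInnerA.eq_def]; simp
  | case2 x digits h0 hneg =>
      rw [pvInnerA.eq_def]
      simp only [if_neg h0, if_pos hneg]
  | case3 x digits h0 hneg heq =>
      -- unreachable: divmod? by 10 is never none
      rw [pvDivmodTen] at heq; cases heq
  | case4 x digits h0 hneg q d heq ih =>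
      rw [pvInnerA.eq_def]
      simp only [if_neg h0, if_neg hneg]
      rw [pvDivmodTen] at heq
      injection heq with heq
      injection heq with hq hd
      rw [ih, List.foldl_append, ← hq, ← hd]
      rfl

theorem outerA_eq_reduceB (fuel : Nat) (x : Int) : pvOuterA fuel x 0 = pvReduceB fuel x := by
  induction fuel generalizing x with
  | zero => rfl
  | succ f ih =>
      simp only [pvOuterA, pvReduceB, digitsB_sum, List.foldl_nil]
      split
      · rfl
      · exact ih _

-- ===== VERDICT (by name: the statement is the Claim_ definition above) =====
theorem get_sum_of_digs_spec : Claim_equal_get_sum_of_digs := by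
  intro x _
  unfold Spec_get_sum_of_digs get_sum_of_digs get_sum_of_digs_alt
  exact outerA_eq_reduceB _ _
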